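-- pv_equiv track=rewrite | github.com/jeff-donovan/aoc-2024 | 8/8.2.py | calculate_antinode_coords_for_antenna_pair
-- ===== SOURCE A (Python) =====
-- def calculate_antinode_coords_for_antenna_pair(map, antenna_pair):
--     a, b = antenna_pair
--     i_diff = b[0] - a[0]
--     j_diff = b[1] - a[1]
--
--     antinodes = set([a, b])
--     for magnitude in range(max(len(map), len(map[0]))):
--         new_a = (a[0] - magnitude * i_diff, a[1] - magnitude * j_diff)
--         new_b = (b[0] + magnitude * i_diff, b[1] + magnitude * j_diff)
--         antinodes.add(new_a)
--         antinodes.add(new_b)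
--     return antinodes
-- ===== SOURCE B (Python) =====
-- def calculate_antinode_coords_for_antenna_pair(map, antenna_pair):
--     a, b = antenna_pair
--     i_diff = b[0] - a[0]
--     j_diff = b[1] - a[1]
--
--     def ladder(n):
--         # plain list of the mirrored pair for every magnitude below n,
--         # assembled recursively back-to-front (no set maintained during construction)
--         if n <= 0:
--             return []
--         m = n - 1
--         return ladder(m) + [(a[0] - m * i_diff, a[1] - m * j_diff),
--                             (b[0] + m * i_diff, b[1] + m * j_diff)]
--
--     return set(ladder(max(len(map), len(map[0]))))
-- ===== Notes on version B (the rewrite author's own statement) =====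
-- stated objective: alternative
-- what changed: B stages the work: a recursive helper assembles the plain list of mirrored coordinate pairs back-to-front (appending the pair for the largest magnitude last) with no set involved, and a single set() call at the end deduplicates, whereas A maintains a set incrementally, seeding it with {a,b} and adding two points per loop iteration.
import Mathlib
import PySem

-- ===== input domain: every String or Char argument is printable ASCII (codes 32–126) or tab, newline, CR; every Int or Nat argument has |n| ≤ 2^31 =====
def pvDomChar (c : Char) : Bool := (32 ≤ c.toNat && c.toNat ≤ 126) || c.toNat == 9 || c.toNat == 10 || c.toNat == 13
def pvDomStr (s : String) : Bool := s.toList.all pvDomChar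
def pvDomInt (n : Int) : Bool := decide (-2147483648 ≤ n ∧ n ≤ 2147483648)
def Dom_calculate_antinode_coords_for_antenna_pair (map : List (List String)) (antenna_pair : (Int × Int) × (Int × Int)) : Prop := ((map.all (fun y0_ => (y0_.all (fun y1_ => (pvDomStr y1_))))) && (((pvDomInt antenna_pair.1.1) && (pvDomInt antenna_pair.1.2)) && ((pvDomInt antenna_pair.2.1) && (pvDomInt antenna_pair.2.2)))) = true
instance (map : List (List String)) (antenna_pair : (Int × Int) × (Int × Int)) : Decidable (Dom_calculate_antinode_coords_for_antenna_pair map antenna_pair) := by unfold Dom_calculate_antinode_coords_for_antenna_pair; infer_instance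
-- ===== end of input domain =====

-- ===== PORT A =====
-- B stages the work: a recursive helper assembles the plain list of mirrored pairs
-- back-to-front with no set involved, then one final set() deduplicates, instead of
-- A's incremental set seeded with {a,b} adding two points per loop iteration.
def calculate_antinode_coords_for_antenna_pair (map : List (List String)) (antenna_pair : (Int × Int) × (Int × Int)) : List (Int × Int) :=
  match PySem.List.pyGet? map 0 with
  | none => []  -- Python raises IndexError on map[0] here; excluded by Pre_
  | some row =>
    let a := antenna_pair.1
    let b := antenna_pair.2
    let i_diff := b.1 - a.1
    let j_diff := b.2 - a.2
    (PySem.List.pyRange 0 (max (PySem.List.len map) (PySem.List.len row)) 1).foldl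
      (fun antinodes magnitude =>
        let new_a := (a.1 - magnitude * i_diff, a.2 - magnitude * j_diff)
        let new_b := (b.1 + magnitude * i_diff, b.2 + magnitude * j_diff)
        PySem.Set.add (PySem.Set.add antinodes new_a) new_b)
      (PySem.Set.ofList [a, b])

-- ===== PORT B =====
-- helper 'ladder' of Source B: the mirrored pair for every magnitude below n, recursively
def pvLadder (a b : Int × Int) (i_diff j_diff : Int) (n : Int) : List (Int × Int) :=
  if h : n ≤ 0 then []
  else
    let m := n - 1
    pvLadder a b i_diff j_diff m ++
      [(a.1 - m * i_diff, a.2 - m * j_diff), (b.1 + m * i_diff, b.2 + m * j_diff)]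
termination_by n.toNat
decreasing_by simp at h; omega

def calculate_antinode_coords_for_antenna_pair_alt (map : List (List String)) (antenna_pair : (Int × Int) × (Int × Int)) : List (Int × Int) :=
  match PySem.List.pyGet? map 0 with
  | none => []  -- Python raises IndexError on map[0] here; excluded by Pre_
  | some row =>
    let a := antenna_pair.1
    let b := antenna_pair.2
    let i_diff := b.1 - a.1
    let j_diff := b.2 - a.2
    PySem.Set.ofList
      (pvLadder a b i_diff j_diff (max (PySem.List.len map) (PySem.List.len row)))

-- ===== PRECONDITION & SPEC =====
-- Pre_ excludes the empty map, on which Python A raises IndexError at map[0].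
def Pre_calculate_antinode_coords_for_antenna_pair (map : List (List String)) (antenna_pair : (Int × Int) × (Int × Int)) : Prop := map ≠ []
instance (map : List (List String)) (antenna_pair : (Int × Int) × (Int × Int)) : Decidable (Pre_calculate_antinode_coords_for_antenna_pair map antenna_pair) := by unfold Pre_calculate_antinode_coords_for_antenna_pair; infer_instance
def pvWitness_calculate_antinode_coords_for_antenna_pair : List (List String) × ((Int × Int) × (Int × Int)) := ([["x"]], ((0, 0), (1, 1)))

def Spec_calculate_antinode_coords_for_antenna_pair (map : List (List String)) (antenna_pair : (Int × Int) × (Int × Int)) (out : List (Int × Int)) : Prop := out = calculate_antinode_coords_for_antenna_pair_alt map antenna_pair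
instance (map : List (List String)) (antenna_pair : (Int × Int) × (Int × Int)) (out : List (Int × Int)) : Decidable (Spec_calculate_antinode_coords_for_antenna_pair map antenna_pair out) := by unfold Spec_calculate_antinode_coords_for_antenna_pair; infer_instance

-- ===== CLAIM (what is proved, stated in full; the proofs are below) =====
def Claim_equal_calculate_antinode_coords_for_antenna_pair : Prop := ∀ (map : List (List String)) (antenna_pair : (Int × Int) × (Int × Int)), Dom_calculate_antinode_coords_for_antenna_pair map antenna_pair → Pre_calculate_antinode_coords_for_antenna_pair map antenna_pair → Spec_calculate_antinode_coords_for_antenna_pair map antenna_pair (calculate_antinode_coords_for_antenna_pair map antenna_pair)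

-- ===== LEMMAS AND PROOFS =====

lemma pvLadder_step (a b : Int × Int) (i j : Int) (m : Nat) :
    pvLadder a b i j ((m + 1 : Nat) : Int)
      = pvLadder a b i j (m : Int) ++
        [(a.1 - (m : Int) * i, a.2 - (m : Int) * j),
         (b.1 + (m : Int) * i, b.2 + (m : Int) * j)] := by
  rw [pvLadder]
  have h : ¬ ((m + 1 : Nat) : Int) ≤ 0 := by push_cast; omega
  simp only [h, dite_false]
  push_cast
  norm_num

-- A's fold over magnitudes [0, m) from the seed set {a, b} equals set([a, b] ++ ladder m)
lemma pvFold_eq_ofList_ladder (a b : Int × Int) (m : Nat) :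
    (PySem.List.pyRange 0 (m : Int) 1).foldl
      (fun antinodes magnitude =>
        PySem.Set.add (PySem.Set.add antinodes
            (a.1 - magnitude * (b.1 - a.1), a.2 - magnitude * (b.2 - a.2)))
          (b.1 + magnitude * (b.1 - a.1), b.2 + magnitude * (b.2 - a.2)))
      (PySem.Set.ofList [a, b])
    = PySem.Set.ofList ([a, b] ++ pvLadder a b (b.1 - a.1) (b.2 - a.2) (m : Int)) := by
  induction m with
  | zero =>
    rw [pvLadder]
    simp [PySem.List.pyRange]
  | succ m ih =>
    have hr : PySem.List.pyRange 0 ((m + 1 : Nat) : Int) 1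
        = PySem.List.pyRange 0 (m : Int) 1 ++ [(m : Int)] := by
      push_cast
      exact PySem.List.pyRange_one_succ_right (by positivity)
    rw [hr, List.foldl_append, ih, pvLadder_step]
    simp only [List.foldl]
    rw [show [a, b] ++ (pvLadder a b (b.1 - a.1) (b.2 - a.2) (m : Int) ++ [_, _])
        = ([a, b] ++ pvLadder a b (b.1 - a.1) (b.2 - a.2) (m : Int)) ++
          [(a.1 - (m : Int) * (b.1 - a.1), a.2 - (m : Int) * (b.2 - a.2)),
           (b.1 + (m : Int) * (b.1 - a.1), b.2 + (m : Int) * (b.2 - a.2))] from by simp,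
      show ∀ (xs : List (Int × Int)) (x y : Int × Int),
          xs ++ [x, y] = (xs ++ [x]) ++ [y] from by intros; simp,
      PySem.Set.ofList_append_singleton, PySem.Set.ofList_append_singleton]

-- for m ≥ 1 the ladder starts with a, b, so the extra [a, b] prefix is absorbed
lemma pvLadder_head (a b : Int × Int) (i j : Int) (m : Nat) (hm : 1 ≤ m) :
    ∃ t, pvLadder a b i j (m : Int) = [a, b] ++ t := by
  induction m, hm using Nat.le_induction with
  | base =>
    refine ⟨[], ?_⟩
    rw [show ((1 : Nat) : Int) = ((0 + 1 : Nat) : Int) from by norm_num, pvLadder_step, pvLadder]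
    simp
  | succ m hm ih =>
    obtain ⟨t, ht⟩ := ih
    exact ⟨t ++ [(a.1 - (m : Int) * i, a.2 - (m : Int) * j),
                 (b.1 + (m : Int) * i, b.2 + (m : Int) * j)],
      by rw [pvLadder_step, ht]; simp⟩

lemma pvOfList_absorb (a b : Int × Int) (t : List (Int × Int)) :
    PySem.Set.ofList ([a, b] ++ ([a, b] ++ t)) = PySem.Set.ofList ([a, b] ++ t) := by
  rw [PySem.Set.ofList_append, PySem.Set.ofList_append, PySem.Set.update_append]
  congr 1
  rw [PySem.Set.update_cons, PySem.Set.update_cons, PySem.Set.update_nil,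
    PySem.Set.add_of_mem (by simp [PySem.Set.mem_ofList]),
    PySem.Set.add_of_mem (by simp [PySem.Set.mem_ofList])]

-- ===== VERDICT (by name: the statement is the Claim_ definition above) =====
theorem calculate_antinode_coords_for_antenna_pair_spec : Claim_equal_calculate_antinode_coords_for_antenna_pair := by
  intro map antenna_pair _hdom hpre
  unfold Spec_calculate_antinode_coords_for_antenna_pair
  unfold Pre_calculate_antinode_coords_for_antenna_pair at hpre
  obtain ⟨row, rest, rfl⟩ : ∃ r t, map = r :: t := by
    cases map with
    | nil => exact absurd rfl hpre
    | cons r t => exact ⟨r, t, rfl⟩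
  have hget : PySem.List.pyGet? (row :: rest) 0 = some row := by
    simp [PySem.List.pyGet?, PySem.List.pyIdx?]
  unfold calculate_antinode_coords_for_antenna_pair calculate_antinode_coords_for_antenna_pair_alt
  rw [hget]
  simp only []
  set a := antenna_pair.1
  set b := antenna_pair.2
  have hN : max (PySem.List.len (row :: rest)) (PySem.List.len row)
      = ((max (row :: rest).length row.length : Nat) : Int) := by
    simp [PySem.List.len]
  rw [hN, pvFold_eq_ofList_ladder]
  obtain ⟨t, ht⟩ := pvLadder_head a b (b.1 - a.1) (b.2 - a.2)
    (max (row :: rest).length row.length) (by simp)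
  rw [ht, pvOfList_absorb]
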